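-- pv_equiv track=rewrite | github.com/Commarian/rolbal_unified_app_2025-08-25 | engine.py | _preferred_rink_order
-- ===== SOURCE A (Python) =====
-- from typing import Dict, List, Tuple, Optional, Set
--
-- def _preferred_rink_order(total_rinks: int) -> List[int]:
--     """
--     Return a preference order favoring center rinks.
--     Example N=7 -> [4,3,5,2,6,1,7]. Works for any N >= 1.
--     """
--     if total_rinks <= 1:
--         return [1] if total_rinks == 1 else []
--     mid = (total_rinks + 1) // 2  # center (round up)
--     order = [mid]
--     left, right = mid - 1, mid + 1
--     while left >= 1 or right <= total_rinks:
--         if left >= 1: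
--             order.append(left)
--             left -= 1
--         if right <= total_rinks:
--             order.append(right)
--             right += 1
--     return order
-- ===== SOURCE B (Python) =====
-- def _preferred_rink_order(total_rinks):
--     mid = (total_rinks + 1) // 2
--     return sorted(range(1, total_rinks + 1), key=lambda r: (abs(r - mid), r))
-- ===== Notes on version B (the rewrite author's own statement) =====
-- stated objective: simpler
-- what changed: Replaced the imperative alternating left/right expansion loop (with special cases for N<=1) by a single sort of range(1, N+1) keyed by (distance from the center rink, rink number), which yields the same center-favoring order with no special cases.
import Mathlib
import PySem

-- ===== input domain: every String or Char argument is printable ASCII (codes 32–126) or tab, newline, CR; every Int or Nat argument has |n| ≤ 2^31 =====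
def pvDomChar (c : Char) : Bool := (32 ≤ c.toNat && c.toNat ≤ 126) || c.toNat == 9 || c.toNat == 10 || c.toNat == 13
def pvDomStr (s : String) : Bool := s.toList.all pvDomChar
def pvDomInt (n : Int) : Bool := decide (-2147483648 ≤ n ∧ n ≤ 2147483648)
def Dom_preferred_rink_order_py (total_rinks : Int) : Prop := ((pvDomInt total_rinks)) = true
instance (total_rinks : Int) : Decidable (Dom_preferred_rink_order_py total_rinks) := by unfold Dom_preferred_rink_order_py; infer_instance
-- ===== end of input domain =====

-- B replaces A's alternating left/right expansion loop by one sort of 1..N keyed by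
-- (distance from the center rink, rink number): simpler, no special cases.

-- ===== PORT A =====
-- the while loop of A: appends `left` (if left >= 1) then `right` (if right <= total_rinks), steps them, repeats
def pvLoopA (N left right : Int) (order : List Int) : List Int :=
  if 1 ≤ left ∨ right ≤ N then
    if 1 ≤ left then
      if right ≤ N then pvLoopA N (left - 1) (right + 1) ((order ++ [left]) ++ [right])
      else pvLoopA N (left - 1) right (order ++ [left])
    else
      if right ≤ N then pvLoopA N left (right + 1) (order ++ [right])
      else order  -- unreachable (loop guard held), kept for the structural recursion
  else order
termination_by (left.toNat + (N + 1 - right).toNat)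
decreasing_by all_goals omega

def preferred_rink_order_py (total_rinks : Int) : List Int :=
  if total_rinks ≤ 1 then (if total_rinks = 1 then [1] else [])
  else
    let mid := PySem.Int.floordiv (total_rinks + 1) 2
    pvLoopA total_rinks (mid - 1) (mid + 1) [mid]

-- ===== PORT B =====
def preferred_rink_order_py_alt (total_rinks : Int) : List Int :=
  let mid := PySem.Int.floordiv (total_rinks + 1) 2
  PySem.List.sorted2 (PySem.List.pyRange 1 (total_rinks + 1)) (fun r => |r - mid|) (fun r => r)

-- ===== PRECONDITION & SPEC =====
def Spec_preferred_rink_order_py (total_rinks : Int) (out : List Int) : Prop := out = preferred_rink_order_py_alt total_rinks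
instance (total_rinks : Int) (out : List Int) : Decidable (Spec_preferred_rink_order_py total_rinks out) := by unfold Spec_preferred_rink_order_py; infer_instance

-- ===== CLAIM (what is proved, stated in full; the proofs are below) =====
def Claim_equal_preferred_rink_order_py : Prop := ∀ (total_rinks : Int), Dom_preferred_rink_order_py total_rinks → Spec_preferred_rink_order_py total_rinks (preferred_rink_order_py total_rinks)

-- ===== LEMMAS AND PROOFS =====

-- sorted2 with two Int keys is sorted with the lexicographic key
lemma pv_sorted2_eq_sorted_lex (xs : List Int) (k1 k2 : Int → Int) :
    PySem.List.sorted2 xs k1 k2 = PySem.List.sorted xs (fun x => toLex (k1 x, k2 x)) := by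
  have hb : (fun a b : Int => decide (k1 a < k1 b) || (!decide (k1 b < k1 a) && decide (k2 a < k2 b)))
      = (fun a b : Int => decide (toLex (k1 a, k2 a) < toLex (k1 b, k2 b))) := by
    funext a b
    simp only [Prod.Lex.toLex_lt_toLex]
    by_cases h1 : k1 a < k1 b <;> by_cases h2 : k1 b < k1 a <;> by_cases h3 : k2 a < k2 b <;>
      simp [h1, h2, h3] <;> omega
  simp only [PySem.List.sorted2, PySem.List.sorted]
  rw [hb]
  simp

-- the loop only ever appends to its accumulator
lemma pvLoopA_append (N : Int) : ∀ (m : Nat) (l r : Int) (acc : List Int),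
    m = l.toNat + (N + 1 - r).toNat →
    pvLoopA N l r acc = acc ++ pvLoopA N l r [] := by
  intro m
  induction m using Nat.strong_induction_on with
  | _ m ih =>
    intro l r acc hm
    conv_lhs => rw [pvLoopA]
    conv_rhs => rw [pvLoopA]
    by_cases hg : 1 ≤ l ∨ r ≤ N
    · simp only [hg, if_true]
      by_cases hl : 1 ≤ l
      · by_cases hr : r ≤ N
        · simp only [hl, hr, if_true]
          rw [ih (((l-1).toNat + (N + 1 - (r+1)).toNat)) (by omega) _ _ _ rfl,
              ih (((l-1).toNat + (N + 1 - (r+1)).toNat)) (by omega) (l-1) (r+1) (([] ++ [l]) ++ [r]) rfl]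
          simp
        · simp only [hl, hr, if_true, if_false]
          rw [ih (((l-1).toNat + (N + 1 - r).toNat)) (by omega) _ _ _ rfl,
              ih (((l-1).toNat + (N + 1 - r).toNat)) (by omega) (l-1) r ([] ++ [l]) rfl]
          simp
      · have hr : r ≤ N := by tauto
        simp only [hl, hr, if_true, if_false]
        rw [ih ((l.toNat + (N + 1 - (r+1)).toNat)) (by omega) _ _ _ rfl,
            ih ((l.toNat + (N + 1 - (r+1)).toNat)) (by omega) l (r+1) ([] ++ [r]) rfl]
        simp
    · simp [hg]

-- main invariant of A's loop: its output is a permutation of [1..l] ++ [r..N],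
-- strictly increasing in the key (distance to mid, value), with all distances bounded below
lemma pvLoop_spec (N mid : Int) (h1 : 2 * mid - 1 ≤ N) (h2 : N ≤ 2 * mid) :
    ∀ (m : Nat) (l r : Int), m = l.toNat + (N + 1 - r).toNat →
    mid + 1 ≤ r → l ≤ mid - 1 → (1 ≤ l → l + r = 2 * mid) →
    (pvLoopA N l r []).Perm (PySem.List.pyRange 1 (l + 1) ++ PySem.List.pyRange r (N + 1)) ∧
    List.Pairwise (fun a b : Int => toLex (|a - mid|, a) < toLex (|b - mid|, b)) (pvLoopA N l r []) ∧
    (∀ x ∈ pvLoopA N l r [], (if 1 ≤ l then mid - l else r - mid) ≤ |x - mid|) := by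
  intro m
  induction m using Nat.strong_induction_on with
  | _ m ih =>
    intro l r hm hr hl hlr
    rw [pvLoopA]
    by_cases hg : 1 ≤ l ∨ r ≤ N
    · simp only [hg, if_true]
      by_cases hl1 : 1 ≤ l
      · have hsum := hlr hl1
        have hrn : r ≤ N := by omega
        simp only [hl1, hrn, if_true]
        rw [pvLoopA_append N ((l-1).toNat + (N + 1 - (r+1)).toNat) _ _ _ rfl]
        obtain ⟨hperm, hpw, hbd⟩ := ih ((l-1).toNat + (N + 1 - (r+1)).toNat) (by omega)
          (l-1) (r+1) rfl (by omega) (by omega) (by omega)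
        simp only [sub_add_cancel] at hperm
        simp only [List.nil_append, List.cons_append]
        refine ⟨?_, ?_, ?_⟩
        · -- permutation
          have e1 : PySem.List.pyRange 1 (l + 1) = PySem.List.pyRange 1 l ++ [l] :=
            PySem.List.pyRange_one_succ_right (by omega)
          have e2 : PySem.List.pyRange r (N + 1) = r :: PySem.List.pyRange (r + 1) (N + 1) :=
            PySem.List.pyRange_one_cons (by omega)
          rw [e1, e2]
          have s1 : (l :: r :: pvLoopA N (l-1) (r+1) []).Perm
              (l :: (PySem.List.pyRange 1 l ++ r :: PySem.List.pyRange (r+1) (N+1))) :=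
            ((hperm.cons r).trans List.perm_middle.symm).cons l
          refine s1.trans ?_
          simpa using
            (List.perm_middle.symm :
              (l :: (PySem.List.pyRange 1 l ++ r :: PySem.List.pyRange (r+1) (N+1))).Perm
                (PySem.List.pyRange 1 l ++ l :: r :: PySem.List.pyRange (r+1) (N+1)))
        · -- pairwise
          have hbd' : ∀ x ∈ pvLoopA N (l-1) (r+1) [], mid - l + 1 ≤ |x - mid| := by
            intro x hx
            have := hbd x hx
            split_ifs at this <;> omega
          constructor
          · intro x hx
            rcases List.mem_cons.mp hx with rfl | hx
            · rw [Prod.Lex.toLex_lt_toLex]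
              right
              refine ⟨?_, by omega⟩
              rw [abs_of_nonpos (by omega), abs_of_nonneg (by omega)]
              omega
            · rw [Prod.Lex.toLex_lt_toLex]
              left
              have := hbd' x hx
              have : |l - mid| = mid - l := by rw [abs_of_nonpos (by omega)]; omega
              omega
          constructor
          · intro x hx
            rw [Prod.Lex.toLex_lt_toLex]
            left
            have := hbd' x hx
            have : |r - mid| = r - mid := by rw [abs_of_nonneg (by omega)]
            omega
          · exact hpw
        · -- lower bound
          intro x hx
          simp only [List.mem_cons] at hx
          rcases hx with rfl | rfl | hx
          · rw [abs_of_nonpos (by omega)]; omega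
          · rw [abs_of_nonneg (by omega)]; omega
          · have := hbd x hx
            split_ifs at this <;> omega
      · have hrn : r ≤ N := by tauto
        simp only [hl1, hrn, if_true, if_false]
        rw [pvLoopA_append N (l.toNat + (N + 1 - (r+1)).toNat) _ _ _ rfl]
        obtain ⟨hperm, hpw, hbd⟩ := ih (l.toNat + (N + 1 - (r+1)).toNat) (by omega)
          l (r+1) rfl (by omega) (by omega) (by omega)
        simp only [List.nil_append]
        have hbd' : ∀ x ∈ pvLoopA N l (r+1) [], r + 1 - mid ≤ |x - mid| := by
          intro x hx
          have := hbd x hx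
          split_ifs at this <;> omega
        refine ⟨?_, ?_, ?_⟩
        · have e2 : PySem.List.pyRange r (N + 1) = r :: PySem.List.pyRange (r + 1) (N + 1) :=
            PySem.List.pyRange_one_cons (by omega)
          have e1 : PySem.List.pyRange 1 (l + 1) = ([] : List Int) :=
            PySem.List.pyRange_one_eq_nil (by omega)
          rw [e1] at hperm
          simp only [List.nil_append] at hperm
          rw [e1, e2]
          simpa using hperm.cons r
        · constructor
          · intro x hx
            rw [Prod.Lex.toLex_lt_toLex]
            have := hbd' x hx
            have : |r - mid| = r - mid := by rw [abs_of_nonneg (by omega)]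
            omega
          · exact hpw
        · intro x hx
          simp only [List.singleton_append, List.mem_cons] at hx
          rcases hx with rfl | hx
          · rw [abs_of_nonneg (by omega)]
          · have := hbd' x hx
            omega
    · simp only [hg, if_false]
      push_neg at hg
      refine ⟨?_, by simp, by simp⟩
      have e1 : PySem.List.pyRange 1 (l + 1) = ([] : List Int) :=
        PySem.List.pyRange_one_eq_nil (by omega)
      have e2 : PySem.List.pyRange r (N + 1) = ([] : List Int) :=
        PySem.List.pyRange_one_eq_nil (by omega)
      rw [e1, e2]
      rfl

-- ===== VERDICT (by name: the statement is the Claim_ definition above) =====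
theorem preferred_rink_order_py_spec : Claim_equal_preferred_rink_order_py := by
  intro N _
  unfold Spec_preferred_rink_order_py preferred_rink_order_py preferred_rink_order_py_alt
  rw [pv_sorted2_eq_sorted_lex]
  set mid := PySem.Int.floordiv (N + 1) 2 with hmiddef
  have hmid : 2 * mid ≤ N + 1 ∧ N + 1 < 2 * mid + 2 := by
    rw [hmiddef, PySem.Int.floordiv_eq_ediv_of_pos (by omega)]
    omega
  by_cases hN : N ≤ 1
  · simp only [hN, if_true]
    by_cases h1 : N = 1
    · subst h1
      simp only [if_true]
      have : mid = 1 := by omega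
      rw [this]
      exact (PySem.List.sorted_eq_of_perm_of_pairwise_lt _ [1] _ (by decide) (by simp)).symm
    · simp only [h1, if_false]
      have : PySem.List.pyRange 1 (N + 1) = ([] : List Int) :=
        PySem.List.pyRange_one_eq_nil (by omega)
      rw [this]
      rfl
  · simp only [hN, if_false]
    push_neg at hN
    rw [pvLoopA_append N ((mid-1).toNat + (N + 1 - (mid+1)).toNat) _ _ _ rfl]
    obtain ⟨hperm, hpw, hbd⟩ := pvLoop_spec N mid (by omega) (by omega)
      ((mid-1).toNat + (N + 1 - (mid+1)).toNat) (mid-1) (mid+1) rfl (by omega) (by omega) (by omega)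
    have hmid1 : 1 ≤ mid := by omega
    have hmidN : mid ≤ N := by omega
    refine (PySem.List.sorted_eq_of_perm_of_pairwise_lt _ _ _ ?_ ?_).symm
    · -- permutation with pyRange 1 (N+1)
      have e0 : PySem.List.pyRange 1 (N + 1) =
          PySem.List.pyRange 1 mid ++ PySem.List.pyRange mid (N + 1) :=
        PySem.List.pyRange_one_append 1 mid (N+1) (by omega) (by omega)
      have e2 : PySem.List.pyRange mid (N + 1) = mid :: PySem.List.pyRange (mid + 1) (N + 1) :=
        PySem.List.pyRange_one_cons (by omega)
      rw [e0, e2]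
      have e1 : PySem.List.pyRange 1 (mid - 1 + 1) = PySem.List.pyRange 1 mid := by ring_nf
      rw [e1] at hperm
      have h1 : (mid :: ([] ++ pvLoopA N (mid-1) (mid+1) [])).Perm
          (mid :: (PySem.List.pyRange 1 mid ++ PySem.List.pyRange (mid+1) (N+1))) := by
        simpa using hperm.cons mid
      exact h1.trans List.perm_middle.symm
    · -- pairwise
      have hbd' : ∀ x ∈ pvLoopA N (mid-1) (mid+1) [], 1 ≤ |x - mid| := by
        intro x hx
        have := hbd x hx
        split_ifs at this <;> omega
      simp only [List.singleton_append]
      constructor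
      · intro x hx
        rw [Prod.Lex.toLex_lt_toLex]
        left
        have := hbd' x hx
        simp only [abs_lt, sub_self]
        omega
      · exact hpw
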